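-- pv_equiv track=rewrite | github.com/yanshg/algorithms | misc/UF_couples_holding_hands.py | get_couple_swaps
-- ===== SOURCE A (Python) =====
-- class UF:
--     def __init__(self, n):
--         self.count = n
--         self.parent = list(range(n))
--         self.size = [1] * n
--
--     def find(self, p):
--         while self.parent[p] != p:
--             self.parent[p] = self.parent[self.parent[p]]
--             p = self.parent[p]
--         return p
--
--     def union(self, p, q):
--         rootp = self.find(p)
--         rootq = self.find(q)
--         if rootp == rootq:
--             return
--
--         if self.size[rootp] > self.size[rootq]:
--             rootp, rootq = rootq, rootp
--
--         self.parent[rootp] = rootq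
--         self.size[rootq] += self.size[rootp]
--         self.count -= 1
--
--     def get_count(self):
--         return self.count
--
-- def get_couple_swaps(row):
--     n = len(row) // 2
--     uf = UF(n)
--     for i in range(n):
--         # union with couple ID
--         c1 = row[2 * i] // 2
--         c2 = row[2 * i + 1] // 2
--         uf.union(c1, c2)
--
--     # swaps = n - uf.count
--     return n - uf.get_count()
-- ===== SOURCE B (Python) =====
-- def get_couple_swaps(row):
--     # Label flood-fill: each couple starts as its own class label; every pair
--     # merges two classes by relabeling; swaps = n - number of distinct labels.
--     n = len(row) // 2
--     label = list(range(n))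
--     for i in range(n):
--         a = label[row[2 * i] // 2]
--         b = label[row[2 * i + 1] // 2]
--         if a != b:
--             label = [b if x == a else x for x in label]
--     return n - len(set(label))
-- ===== Notes on version B (the rewrite author's own statement) =====
-- stated objective: alternative
-- what changed: Replaces A's union-find forest (find with path compression, union by size, maintained component counter) by a flat class-label array: each pair merges two classes by relabeling the whole array, and the answer counts distinct labels at the end.
import Mathlib
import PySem

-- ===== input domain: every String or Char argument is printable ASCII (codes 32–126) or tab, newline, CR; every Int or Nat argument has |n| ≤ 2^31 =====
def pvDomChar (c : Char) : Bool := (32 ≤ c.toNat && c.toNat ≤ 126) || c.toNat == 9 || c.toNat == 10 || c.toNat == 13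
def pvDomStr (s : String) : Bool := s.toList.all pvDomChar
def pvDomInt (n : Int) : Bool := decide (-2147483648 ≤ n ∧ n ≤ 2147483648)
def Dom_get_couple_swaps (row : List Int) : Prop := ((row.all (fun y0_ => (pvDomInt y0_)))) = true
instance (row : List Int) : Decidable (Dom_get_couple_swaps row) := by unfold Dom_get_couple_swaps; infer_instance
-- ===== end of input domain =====

-- B replaces A's union-find forest by flat class labels merged via whole-array
-- relabeling (objective: alternative; not faster, O(n^2) worst case vs A's near-linear).

-- ===== PORT A =====
-- while self.parent[p] != p: self.parent[p] = self.parent[self.parent[p]]; p = self.parent[p]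
-- (fuel only makes the loop total in Lean; it is never exhausted on admitted inputs)
def ufFind (parent : List Int) (p : Int) : Nat → Int × List Int
  | 0 => (p, parent)
  | fuel + 1 =>
      let pp := PySem.List.pyGetD parent p 0
      if pp = p then (p, parent)
      else
        let gp := PySem.List.pyGetD parent pp 0
        ufFind (PySem.List.pySetD parent p gp) gp fuel

def ufUnion (cnt : Int) (parent size : List Int) (p q : Int) : Int × List Int × List Int :=
  let fp := ufFind parent p (parent.length + 1)
  let rootp := fp.1
  let fq := ufFind fp.2 q (fp.2.length + 1)
  let rootq := fq.1
  let parent2 := fq.2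
  if rootp = rootq then (cnt, parent2, size)
  else
    let sp := PySem.List.pyGetD size rootp 0
    let sq := PySem.List.pyGetD size rootq 0
    let rp := if sp > sq then rootq else rootp
    let rq := if sp > sq then rootp else rootq
    let parent3 := PySem.List.pySetD parent2 rp rq
    let size3 := PySem.List.pySetD size rq
      (PySem.List.pyGetD size rq 0 + PySem.List.pyGetD size rp 0)
    (cnt - 1, parent3, size3)

def get_couple_swaps (row : List Int) : Int :=
  let n := row.length / 2
  let st := (List.range n).foldl
    (fun st i =>
      let c1 := PySem.Int.floordiv (PySem.List.pyGetD row ((2 * i : Nat) : Int) 0) 2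
      let c2 := PySem.Int.floordiv (PySem.List.pyGetD row ((2 * i + 1 : Nat) : Int) 0) 2
      ufUnion st.1 st.2.1 st.2.2 c1 c2)
    ((n : Int), (List.range n).map (fun i => Int.ofNat i), List.replicate n (1 : Int))
  (n : Int) - st.1

-- ===== PORT B =====
def get_couple_swaps_alt (row : List Int) : Int :=
  let n := row.length / 2
  let label := (List.range n).foldl
    (fun lab i =>
      let a := PySem.List.pyGetD lab
        (PySem.Int.floordiv (PySem.List.pyGetD row ((2 * i : Nat) : Int) 0) 2) 0
      let b := PySem.List.pyGetD lab
        (PySem.Int.floordiv (PySem.List.pyGetD row ((2 * i + 1 : Nat) : Int) 0) 2) 0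
      if a ≠ b then lab.map (fun x => if x = a then b else x) else lab)
    ((List.range n).map (fun i => Int.ofNat i))
  (n : Int) - PySem.Set.len (PySem.Set.ofList label)

-- ===== PRECONDITION & SPEC =====
-- Pre_ excludes exactly the inputs where some couple id row[i]//2 is out of range
-- [-n, n) for the union-find's parent table of size n = len(row)//2: there the
-- Python A raises IndexError (and B raises it too).
def Pre_get_couple_swaps (row : List Int) : Prop :=
  ∀ i < 2 * (row.length / 2),
    PySem.Raise.InRange (row.length / 2) (PySem.Int.floordiv (row.getD i 0) 2)
instance (row : List Int) : Decidable (Pre_get_couple_swaps row) := by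
  unfold Pre_get_couple_swaps; infer_instance

def pvWitness_get_couple_swaps : List Int := [0, 1, 3, 2]

def Spec_get_couple_swaps (row : List Int) (out : Int) : Prop := out = get_couple_swaps_alt row
instance (row : List Int) (out : Int) : Decidable (Spec_get_couple_swaps row out) := by
  unfold Spec_get_couple_swaps; infer_instance

-- ===== CLAIM (what is proved, stated in full; the proofs are below) =====
def Claim_equal_get_couple_swaps : Prop := ∀ (row : List Int), Dom_get_couple_swaps row → Pre_get_couple_swaps row → Spec_get_couple_swaps row (get_couple_swaps row)

-- ===== LEMMAS AND PROOFS =====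

-- parent table read as a function on Nat indices
def pfn (parent : List Int) (p : Nat) : Nat := (parent.getD p 0).toNat
-- the root of p: iterate the parent map n times
def rootOfN (n : Nat) (parent : List Int) (p : Nat) : Nat := (pfn parent)^[n] p
-- the set of roots
def rootsF (n : Nat) (parent : List Int) : Finset Nat :=
  (Finset.range n).filter (fun p => pfn parent p = p)
-- a Python index resolved against length n
def wrapIdx (n : Nat) (p : Int) : Nat := if p < 0 then (p + n).toNat else p.toNat

-- union-find state invariant
structure UFInv (n : Nat) (parent size : List Int) : Prop where
  plen : parent.length = n
  slen : size.length = n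
  pnn : ∀ p < n, 0 ≤ parent.getD p 0
  pbd : ∀ p < n, pfn parent p < n
  mono : ∀ p < n, pfn parent p ≠ p → size.getD p 0 < size.getD (pfn parent p) 0
  spos : ∀ p < n, 1 ≤ size.getD p 0
  sbd : ∀ p < n, size.getD p 0 ≤ (n : Int)
  ssum : (∑ p ∈ Finset.range n, (if pfn parent p = p then size.getD p 0 else 0)) = (n : Int)

-- full simulation invariant between A's state and B's label array
def SimInv (n : Nat) (st : Int × List Int × List Int) (lab : List Int) : Prop :=
  UFInv n st.2.1 st.2.2 ∧ lab.length = n ∧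
  st.1 = ((rootsF n st.2.1).card : Int) ∧
  ∀ p < n, ∀ q < n,
    (rootOfN n st.2.1 p = rootOfN n st.2.1 q ↔ lab.getD p 0 = lab.getD q 0)

theorem getD_set (xs : List Int) (i k : Nat) (v d : Int) :
    (xs.set i v).getD k d = if k = i ∧ i < xs.length then v else xs.getD k d := by
  by_cases hk : k = i ∧ i < xs.length
  · obtain ⟨rfl, hlt⟩ := hk
    simp [List.getD_eq_getElem?_getD, hlt]
  · rw [if_neg hk]
    rcases Decidable.not_and_iff_not_or_not.1 hk with hne | hge
    · simp [List.getD_eq_getElem?_getD, Ne.symm hne]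
    · have : xs.set i v = xs := List.set_eq_of_length_le (by omega)
      rw [this]

theorem iter_lt (h : UFInv n parent size) (k p : ℕ) (hp : p < n) :
    (pfn parent)^[k] p < n := by
  induction k generalizing p with
  | zero => simpa using hp
  | succ k ih => rw [Function.iterate_succ_apply]; exact ih _ (h.pbd p hp)

theorem hits_root (h : UFInv n parent size) :
    ∀ k p, p < n → n ≤ (size.getD p 0).toNat + k →
      ∃ j ≤ k, pfn parent ((pfn parent)^[j] p) = (pfn parent)^[j] p := by
  intro k
  induction k with
  | zero =>
    intro p hp hk
    refine ⟨0, le_refl _, ?_⟩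
    simp only [Function.iterate_zero, id]
    by_contra hne
    have h1 := h.mono p hp hne
    have h2 := h.sbd p hp
    have h3 := h.sbd (pfn parent p) (h.pbd p hp)
    have h4 := h.spos p hp
    omega
  | succ k ih =>
    intro p hp hk
    by_cases hroot : pfn parent p = p
    · exact ⟨0, Nat.zero_le _, by simpa using hroot⟩
    · have hlt := h.pbd p hp
      have hm := h.mono p hp hroot
      have hs1 := h.spos p hp
      obtain ⟨j, hj, hr⟩ := ih (pfn parent p) hlt (by omega)
      exact ⟨j + 1, by omega, by rw [Function.iterate_succ_apply]; exact hr⟩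

theorem root_absorb (f : ℕ → ℕ) (r : ℕ) (hr : f r = r) (m : ℕ) : f^[m] r = r := by
  induction m with
  | zero => rfl
  | succ m ih => rw [Function.iterate_succ_apply, hr, ih]

theorem rootOf_isRoot (h : UFInv n parent size) (hp : p < n) :
    pfn parent (rootOfN n parent p) = rootOfN n parent p := by
  obtain ⟨j, hj, hr⟩ := hits_root h n p hp (by omega)
  have hro : rootOfN n parent p = (pfn parent)^[j] p := by
    unfold rootOfN
    rw [show n = (n - j) + j by omega, Function.iterate_add_apply]
    exact root_absorb _ _ hr _
  rw [hro]; exact hr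

theorem rootOf_lt (h : UFInv n parent size) (hp : p < n) : rootOfN n parent p < n := by
  exact iter_lt h n p hp

theorem rootOf_fix (n : ℕ) (parent : List Int) (r : ℕ) (hr : pfn parent r = r) :
    rootOfN n parent r = r := by
  exact root_absorb _ _ hr _

theorem rootOf_pf (h : UFInv n parent size) (hp : p < n) :
    rootOfN n parent (pfn parent p) = rootOfN n parent p := by
  unfold rootOfN
  rw [← Function.iterate_succ_apply, Function.iterate_succ_apply']
  exact rootOf_isRoot h hp

theorem root_unique (h : UFInv n parent size) (hp : p < n) (k : ℕ) (r : ℕ)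
    (hk : (pfn parent)^[k] p = r) (hr : pfn parent r = r) : r = rootOfN n parent p := by
  by_cases hk' : k ≤ n
  · have hro : rootOfN n parent p = (pfn parent)^[n - k] ((pfn parent)^[k] p) := by
      unfold rootOfN
      rw [← Function.iterate_add_apply]
      congr 1
      omega
    rw [hk] at hro
    rw [hro, root_absorb _ _ hr]
  · have h1 : (pfn parent)^[k] p = (pfn parent)^[k - n] (rootOfN n parent p) := by
      unfold rootOfN
      rw [← Function.iterate_add_apply, Nat.sub_add_cancel (by omega)]
    rw [root_absorb _ _ (rootOf_isRoot h hp)] at h1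
    rw [← hk, h1]

theorem reach_sub (h' : UFInv n parent' size')
    (hstep : ∀ x < n, ∃ k, (pfn parent)^[k] x = pfn parent' x) :
    ∀ m x, x < n → ∃ K, (pfn parent)^[K] x = (pfn parent')^[m] x := by
  intro m
  induction m with
  | zero => intro x hx; exact ⟨0, rfl⟩
  | succ m ih =>
    intro x hx
    obtain ⟨k0, hk0⟩ := hstep x hx
    obtain ⟨K, hK⟩ := ih (pfn parent' x) (h'.pbd x hx)
    refine ⟨K + k0, ?_⟩
    rw [Function.iterate_add_apply, hk0, hK, Function.iterate_succ_apply]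

-- path-compression step: set parent[j] to its grandparent
theorem compress_ok (h : UFInv n parent size) (hj : j < n) (hnr : pfn parent j ≠ j) :
    UFInv n (parent.set j ((pfn parent (pfn parent j) : Nat) : Int)) size ∧
    (∀ x, pfn (parent.set j ((pfn parent (pfn parent j) : Nat) : Int)) x = x ↔ pfn parent x = x) ∧
    (∀ x < n, rootOfN n (parent.set j ((pfn parent (pfn parent j) : Nat) : Int)) x = rootOfN n parent x) := by
  have hplen : j < parent.length := by rw [h.plen]; exact hj
  have hg : pfn parent j < n := h.pbd j hj
  have hgp : pfn parent (pfn parent j) < n := h.pbd _ hg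
  have hszj : size.getD j 0 < size.getD (pfn parent j) 0 := h.mono j hj hnr
  have hsz : size.getD j 0 < size.getD (pfn parent (pfn parent j)) 0 := by
    by_cases hgr : pfn parent (pfn parent j) = pfn parent j
    · rw [hgr]; exact hszj
    · exact lt_trans hszj (h.mono _ hg hgr)
  set gp := pfn parent (pfn parent j) with hgpdef
  set parent' := parent.set j ((gp : Nat) : Int) with hp'def
  have hpf' : ∀ x, pfn parent' x = if x = j then gp else pfn parent x := by
    intro x
    unfold pfn
    rw [hp'def, getD_set]
    by_cases hx : x = j
    · simp [hx, hplen]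
    · simp [hx]
  have hgpj : gp ≠ j := by
    intro hcontra
    rw [hcontra] at hsz
    omega
  have h' : UFInv n parent' size := by
    refine ⟨?_, h.slen, ?_, ?_, ?_, h.spos, h.sbd, ?_⟩
    · rw [hp'def, List.length_set, h.plen]
    · intro p hp
      rw [hp'def, getD_set]
      by_cases hx : p = j
      · simp [hx, hplen]
      · simp [hx]; exact h.pnn p hp
    · intro p hp
      rw [hpf']
      by_cases hx : p = j
      · simp [hx]; exact hgp
      · simp [hx]; exact h.pbd p hp
    · intro p hp hne
      rw [hpf'] at hne ⊢
      by_cases hx : p = j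
      · subst hx; simp only [if_pos] at hne ⊢; exact hsz
      · simp only [if_neg hx] at hne ⊢; exact h.mono p hp hne
    · rw [← h.ssum]
      apply Finset.sum_congr rfl
      intro p hp
      rw [hpf']
      by_cases hx : p = j
      · subst hx; simp [hgpj, hnr]
      · simp [hx]
  have hiff : ∀ x, (pfn parent' x = x ↔ pfn parent x = x) := by
    intro x
    rw [hpf']
    by_cases hx : x = j
    · subst hx; simp [hgpj, hnr]
    · simp [hx]
  refine ⟨h', hiff, ?_⟩
  intro x hx
  have hstep : ∀ y < n, ∃ k, (pfn parent)^[k] y = pfn parent' y := by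
    intro y hy
    rw [hpf']
    by_cases hyj : y = j
    · subst hyj
      exact ⟨2, by simp [Function.iterate_succ_apply, hgpdef]⟩
    · exact ⟨1, by simp [hyj]⟩
  obtain ⟨K, hK⟩ := reach_sub h' hstep n x hx
  have hroot' : pfn parent' (rootOfN n parent' x) = rootOfN n parent' x := rootOf_isRoot h' hx
  have hroot : pfn parent (rootOfN n parent' x) = rootOfN n parent' x := (hiff _).1 hroot'
  show (pfn parent')^[n] x = rootOfN n parent x
  exact root_unique h hx K _ hK hroot

-- find on a nonnegative in-range index
theorem find_ok (n : ℕ) (size : List Int) :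
    ∀ (fuel : ℕ) (parent : List Int) (p : ℕ), UFInv n parent size → p < n →
    n + 2 ≤ fuel + (size.getD p 0).toNat →
    ∃ parent', ufFind parent (p : Int) fuel = (((rootOfN n parent p : Nat) : Int), parent') ∧
      UFInv n parent' size ∧ (∀ x, pfn parent' x = x ↔ pfn parent x = x) ∧
      (∀ x < n, rootOfN n parent' x = rootOfN n parent x) := by
  intro fuel
  induction fuel with
  | zero =>
    intro parent p h hp hfuel
    exfalso
    have := h.sbd p hp
    omega
  | succ fuel ih =>
    intro parent p h hp hfuel
    have hpnn := h.pnn p hp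
    have hgnn := h.pnn (pfn parent p) (h.pbd p hp)
    have hppval : PySem.List.pyGetD parent ((p : ℕ) : Int) 0 = ((pfn parent p : ℕ) : Int) := by
      rw [PySem.List.pyGetD_natCast]; exact (Int.toNat_of_nonneg hpnn).symm
    have hgpval : PySem.List.pyGetD parent ((pfn parent p : ℕ) : Int) 0
        = ((pfn parent (pfn parent p) : ℕ) : Int) := by
      rw [PySem.List.pyGetD_natCast]; exact (Int.toNat_of_nonneg hgnn).symm
    by_cases hroot : pfn parent p = p
    · refine ⟨parent, ?_, h, fun x => Iff.rfl, fun x hx => rfl⟩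
      simp only [ufFind, hppval]
      rw [if_pos (by exact_mod_cast congrArg (Nat.cast : ℕ → Int) hroot),
        rootOf_fix n parent p hroot]
    · obtain ⟨h', hiff, hroots⟩ := compress_ok h hp hroot
      have hg : pfn parent p < n := h.pbd p hp
      have hgp : pfn parent (pfn parent p) < n := h.pbd _ hg
      have hszj : size.getD p 0 < size.getD (pfn parent p) 0 := h.mono p hp hroot
      have hszlt : size.getD p 0 < size.getD (pfn parent (pfn parent p)) 0 := by
        by_cases hgr : pfn parent (pfn parent p) = pfn parent p
        · rw [hgr]; exact hszj
        · exact lt_trans hszj (h.mono _ hg hgr)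
      have hs1 := h.spos p hp
      obtain ⟨parent'', heq, h'', hiff', hroots'⟩ :=
        ih (parent.set p ((pfn parent (pfn parent p) : ℕ) : Int)) (pfn parent (pfn parent p))
          h' hgp (by omega)
      refine ⟨parent'', ?_, h'', fun x => (hiff' x).trans (hiff x),
        fun x hx => (hroots' x hx).trans (hroots x hx)⟩
      simp only [ufFind, hppval]
      rw [if_neg (by intro hc; exact hroot (by exact_mod_cast hc)), hgpval]
      rw [PySem.List.pySetD_natCast]
      rw [heq, hroots _ hgp, rootOf_pf h hg, rootOf_pf h hp]

theorem pyGetD_wrap (xs : List Int) (c : Int) (n : ℕ) (hlen : xs.length = n)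
    (hc : PySem.Raise.InRange n c) :
    PySem.List.pyGetD xs c 0 = xs.getD (wrapIdx n c) 0 := by
  obtain ⟨h1, h2⟩ := hc
  rcases lt_or_ge c 0 with hneg | hpos
  · have hk : 0 < (-c).toNat := by omega
    have hk' : (-c).toNat ≤ xs.length := by omega
    have hceq : c = -((((-c).toNat : ℕ)) : Int) := by omega
    have hidx : wrapIdx n c = xs.length - (-c).toNat := by
      unfold wrapIdx; rw [if_pos hneg]; omega
    nth_rewrite 1 [hceq]
    rw [PySem.List.pyGetD_neg_natCast xs _ 0 hk hk', hidx]
    exact (List.getD_eq_getElem xs 0 (by omega)).symm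
  · rw [PySem.List.pyGetD_eq_getElem xs 0 hpos (by omega)]
    have hidx : wrapIdx n c = c.toNat := by unfold wrapIdx; rw [if_neg (not_lt.2 hpos)]
    rw [hidx]
    exact (List.getD_eq_getElem xs 0 (by omega)).symm

theorem wrapIdx_lt (n : ℕ) (c : Int) (hc : PySem.Raise.InRange n c) : wrapIdx n c < n := by
  obtain ⟨h1, h2⟩ := hc
  unfold wrapIdx
  split_ifs <;> omega

theorem pySetD_wrap (xs : List Int) (v p : Int) (n : ℕ) (hlen : xs.length = n)
    (hp : PySem.Raise.InRange n p) :
    PySem.List.pySetD xs p v = xs.set (wrapIdx n p) v := by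
  obtain ⟨h1, h2⟩ := hp
  have hidx : PySem.List.pyIdx? xs.length p = some (wrapIdx n p) := by
    subst hlen
    simp only [PySem.List.pyIdx?, wrapIdx]
    split_ifs <;> first | rfl | omega | (congr 1; omega)
  simp [PySem.List.pySetD, PySem.List.pySet?, hidx]

theorem pfn_congr (parent parent' : List Int)
    (hget : ∀ x, parent'.getD x 0 = parent.getD x 0) : pfn parent' = pfn parent := by
  funext x
  unfold pfn
  rw [hget]

theorem UFInv_congr (h : UFInv n parent size) (hlen : parent'.length = parent.length)
    (hget : ∀ x, parent'.getD x 0 = parent.getD x 0) : UFInv n parent' size := by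
  have hpf := pfn_congr parent parent' hget
  refine ⟨by rw [hlen, h.plen], h.slen, ?_, ?_, ?_, h.spos, h.sbd, ?_⟩
  · intro p hp; rw [hget]; exact h.pnn p hp
  · intro p hp; rw [hpf]; exact h.pbd p hp
  · intro p hp; rw [hpf]; exact h.mono p hp
  · rw [hpf]; exact h.ssum

-- find on any in-range Python index (possibly negative)
theorem find_ok' (h : UFInv n parent size) (hp : PySem.Raise.InRange n p) :
    ∃ parent', ufFind parent p (n + 1) = (((rootOfN n parent (wrapIdx n p) : Nat) : Int), parent') ∧
      UFInv n parent' size ∧ (∀ x, pfn parent' x = x ↔ pfn parent x = x) ∧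
      (∀ x < n, rootOfN n parent' x = rootOfN n parent x) := by
  rcases lt_or_ge p 0 with hneg | hpos
  · -- negative index: Python wraps; the first loop iteration rewrites parent[p] in place
    have hn1 : 1 ≤ n := by obtain ⟨h1, h2⟩ := hp; omega
    set j := wrapIdx n p with hjdef
    have hj : j < n := wrapIdx_lt n p hp
    have hpnnj := h.pnn j hj
    have hppval : PySem.List.pyGetD parent p 0 = ((pfn parent j : ℕ) : Int) := by
      rw [pyGetD_wrap parent p n h.plen hp, ← hjdef]
      exact (Int.toNat_of_nonneg hpnnj).symm
    have hppne : PySem.List.pyGetD parent p 0 ≠ p := by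
      rw [hppval]; intro hc; omega
    have hgnn := h.pnn (pfn parent j) (h.pbd j hj)
    have hgpval : PySem.List.pyGetD parent ((pfn parent j : ℕ) : Int) 0
        = ((pfn parent (pfn parent j) : ℕ) : Int) := by
      rw [PySem.List.pyGetD_natCast]; exact (Int.toNat_of_nonneg hgnn).symm
    have hsetval : PySem.List.pySetD parent p ((pfn parent (pfn parent j) : ℕ) : Int)
        = parent.set j ((pfn parent (pfn parent j) : ℕ) : Int) := by
      rw [pySetD_wrap parent _ p n h.plen hp]
    obtain ⟨m, hm⟩ : ∃ m, n = m + 1 := ⟨n - 1, by omega⟩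
    by_cases hroot : pfn parent j = j
    · -- parent[p] is already the root: the loop rewrites it with itself and exits
      set parent' := parent.set j ((pfn parent (pfn parent j) : ℕ) : Int) with hp'def
      have hget' : ∀ x, parent'.getD x 0 = parent.getD x 0 := by
        intro x
        rw [hp'def, getD_set]
        by_cases hx : x = j
        · subst hx
          rw [if_pos ⟨rfl, by rw [h.plen]; exact hj⟩, hroot, hroot]
          conv_lhs => rw [← hroot]
          exact Int.toNat_of_nonneg hpnnj
        · rw [if_neg (by tauto)]
      have h' := UFInv_congr h (by rw [hp'def, List.length_set]) hget'
      have hpf' := pfn_congr parent parent' hget'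
      refine ⟨parent', ?_, h', fun x => by rw [hpf'], fun x hx => by unfold rootOfN; rw [hpf']⟩
      rw [show n + 1 = (n : ℕ) + 1 from rfl]
      simp only [ufFind, hppval]
      rw [if_neg (by rw [← hppval]; exact hppne), hgpval, hsetval]
      rw [hroot, hroot]
      have hppval' : PySem.List.pyGetD parent' ((j : ℕ) : Int) 0 = ((j : ℕ) : Int) := by
        rw [PySem.List.pyGetD_natCast, hget' j]
        conv_rhs => rw [← hroot]
        exact (Int.toNat_of_nonneg hpnnj).symm
      rw [hm]
      simp only [ufFind, hppval', if_true]
      rw [rootOf_fix _ parent j hroot]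
    · -- genuine step: compress at j, then the nonnegative find takes over
      obtain ⟨h', hiff, hroots⟩ := compress_ok h hj hroot
      have hg : pfn parent j < n := h.pbd j hj
      have hgp : pfn parent (pfn parent j) < n := h.pbd _ hg
      have hszj : size.getD j 0 < size.getD (pfn parent j) 0 := h.mono j hj hroot
      have hszlt : size.getD j 0 < size.getD (pfn parent (pfn parent j)) 0 := by
        by_cases hgr : pfn parent (pfn parent j) = pfn parent j
        · rw [hgr]; exact hszj
        · exact lt_trans hszj (h.mono _ hg hgr)
      have hs1 := h.spos j hj
      have hs2 := h.sbd j hj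
      obtain ⟨parent'', heq, h'', hiff', hroots'⟩ :=
        find_ok n size n (parent.set j ((pfn parent (pfn parent j) : ℕ) : Int))
          (pfn parent (pfn parent j)) h' hgp (by omega)
      refine ⟨parent'', ?_, h'', fun x => (hiff' x).trans (hiff x),
        fun x hx => (hroots' x hx).trans (hroots x hx)⟩
      rw [show n + 1 = (n : ℕ) + 1 from rfl]
      simp only [ufFind, hppval]
      rw [if_neg (by rw [← hppval]; exact hppne), hgpval, hsetval]
      rw [heq, hroots _ hgp, rootOf_pf h hg, rootOf_pf h hj]
  · -- nonnegative index
    have hj : p.toNat < n := by obtain ⟨h1, h2⟩ := hp; omega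
    have hwrap : wrapIdx n p = p.toNat := by unfold wrapIdx; rw [if_neg (not_lt.2 hpos)]
    have hcast : ((p.toNat : ℕ) : Int) = p := Int.toNat_of_nonneg hpos
    obtain ⟨parent', heq, h', hiff, hroots⟩ :=
      find_ok n size (n + 1) parent p.toNat h hj (by have := h.spos _ hj; omega)
    rw [hcast] at heq
    rw [hwrap]
    exact ⟨parent', heq, h', hiff, hroots⟩

-- union of two distinct roots
theorem merge_ok (h : UFInv n parent size) (hrp : rp < n) (hrq : rq < n)
    (hrootp : pfn parent rp = rp) (hrootq : pfn parent rq = rq) (hne : rp ≠ rq) :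
    UFInv n (parent.set rp ((rq : Nat) : Int)) (size.set rq (size.getD rq 0 + size.getD rp 0)) ∧
    (∀ x < n, rootOfN n (parent.set rp ((rq : Nat) : Int)) x =
      if rootOfN n parent x = rp then rq else rootOfN n parent x) ∧
    rootsF n (parent.set rp ((rq : Nat) : Int)) = (rootsF n parent).erase rp := by
  have hplen : rp < parent.length := by rw [h.plen]; exact hrp
  have hslen : rq < size.length := by rw [h.slen]; exact hrq
  have hrqrp : rq ≠ rp := Ne.symm hne
  have hsp := h.spos rp hrp
  have hsq := h.spos rq hrq
  have hpf' : ∀ x, pfn (parent.set rp ((rq : ℕ) : Int)) x = if x = rp then rq else pfn parent x := by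
    intro x
    unfold pfn
    rw [getD_set]
    by_cases hx : x = rp
    · simp [hx, hplen]
    · simp [hx]
  have hsz' : ∀ x, (size.set rq (size.getD rq 0 + size.getD rp 0)).getD x 0
      = if x = rq then size.getD rq 0 + size.getD rp 0 else size.getD x 0 := by
    intro x
    rw [getD_set]
    by_cases hx : x = rq
    · simp [hx, hslen]
    · simp [hx]
  have hsum2 : size.getD rp 0 + size.getD rq 0 ≤ (n : Int) := by
    have hsub : ({rp, rq} : Finset ℕ) ⊆ Finset.range n := by
      intro x hx
      rcases Finset.mem_insert.1 hx with rfl | hx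
      · exact Finset.mem_range.2 hrp
      · rw [Finset.mem_singleton.1 hx]; exact Finset.mem_range.2 hrq
    calc size.getD rp 0 + size.getD rq 0
        = ∑ p ∈ ({rp, rq} : Finset ℕ), (if pfn parent p = p then size.getD p 0 else 0) := by
          rw [Finset.sum_pair hne, if_pos hrootp, if_pos hrootq]
      _ ≤ ∑ p ∈ Finset.range n, (if pfn parent p = p then size.getD p 0 else 0) := by
          apply Finset.sum_le_sum_of_subset_of_nonneg hsub
          intro i hi _
          split_ifs
          · exact le_of_lt (by have := h.spos i (Finset.mem_range.1 hi); omega)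
          · exact le_refl 0
      _ = (n : Int) := h.ssum
  have h' : UFInv n (parent.set rp ((rq : ℕ) : Int)) (size.set rq (size.getD rq 0 + size.getD rp 0)) := by
    refine ⟨by rw [List.length_set, h.plen], by rw [List.length_set, h.slen], ?_, ?_, ?_, ?_, ?_, ?_⟩
    · intro x hx
      rw [getD_set]
      by_cases hxr : x = rp
      · simp [hxr, hplen]
      · simp [hxr]; exact h.pnn x hx
    · intro x hx
      rw [hpf']
      by_cases hxr : x = rp
      · simp [hxr]; exact hrq
      · simp [hxr]; exact h.pbd x hx
    · intro x hx hne'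
      rw [hpf'] at hne' ⊢
      rw [hsz', hsz']
      by_cases hxrp : x = rp
      · subst hxrp
        rw [if_pos rfl] at hne' ⊢
        rw [if_pos rfl, if_neg hne]
        omega
      · rw [if_neg hxrp] at hne' ⊢
        have hxrq : x ≠ rq := by
          intro hc; subst hc; exact hne' hrootq
        rw [if_neg hxrq]
        have hmono := h.mono x hx hne'
        by_cases hpq : pfn parent x = rq
        · rw [if_pos hpq]; rw [hpq] at hmono; omega
        · rw [if_neg hpq]; exact hmono
    · intro x hx
      rw [hsz']
      split_ifs
      · omega
      · exact h.spos x hx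
    · intro x hx
      rw [hsz']
      split_ifs
      · omega
      · exact h.sbd x hx
    · have hterm : ∀ x ∈ Finset.range n,
          (if pfn (parent.set rp ((rq : ℕ) : Int)) x = x
            then (size.set rq (size.getD rq 0 + size.getD rp 0)).getD x 0 else 0)
          = (if pfn parent x = x then size.getD x 0 else 0)
            + (if x = rq then size.getD rp 0 else 0)
            - (if x = rp then size.getD rp 0 else 0) := by
        intro x hx
        rw [hpf', hsz']
        by_cases hxrp : x = rp
        · subst hxrp
          rw [if_pos rfl, if_pos rfl, if_neg hne, if_neg hne, if_pos hrootp]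
          omega
        · rw [if_neg hxrp, if_neg hxrp]
          by_cases hxrq : x = rq
          · subst hxrq
            rw [if_pos rfl, if_pos rfl, if_pos hrootq, if_pos hrootq]
            omega
          · rw [if_neg hxrq, if_neg hxrq]
            omega
      rw [Finset.sum_congr rfl hterm]
      rw [Finset.sum_sub_distrib, Finset.sum_add_distrib]
      rw [Finset.sum_ite_eq' (Finset.range n) rq fun _ => size.getD rp 0,
        Finset.sum_ite_eq' (Finset.range n) rp fun _ => size.getD rp 0]
      rw [if_pos (Finset.mem_range.2 hrq), if_pos (Finset.mem_range.2 hrp), h.ssum]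
      omega
  refine ⟨h', ?_, ?_⟩
  · have hreach : ∀ k x, x < n → (pfn parent)^[k] x = rootOfN n parent x →
        ∃ K, (pfn (parent.set rp ((rq : ℕ) : Int)))^[K] x
          = (if rootOfN n parent x = rp then rq else rootOfN n parent x) := by
      intro k
      induction k with
      | zero =>
        intro x hx hiter
        simp only [Function.iterate_zero, id] at hiter
        by_cases hxrp : x = rp
        · refine ⟨1, ?_⟩
          rw [Function.iterate_one, hpf', if_pos hxrp, if_pos (by rw [← hiter, hxrp])]
        · refine ⟨0, ?_⟩
          rw [Function.iterate_zero, id, if_neg (by rw [← hiter]; exact hxrp), ← hiter]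
      | succ k ih =>
        intro x hx hiter
        by_cases hxroot : pfn parent x = x
        · have hfix : rootOfN n parent x = x := rootOf_fix n parent x hxroot
          by_cases hxrp : x = rp
          · refine ⟨1, ?_⟩
            rw [Function.iterate_one, hpf', if_pos hxrp, if_pos (by rw [hfix, hxrp])]
          · refine ⟨0, ?_⟩
            rw [Function.iterate_zero, id, if_neg (by rw [hfix]; exact hxrp), hfix]
        · have hxrp : x ≠ rp := by
            intro hc; subst hc; exact hxroot hrootp
          have hiter' : (pfn parent)^[k] (pfn parent x) = rootOfN n parent (pfn parent x) := by
            rw [rootOf_pf h hx, ← Function.iterate_succ_apply]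
            exact hiter
          obtain ⟨K, hK⟩ := ih (pfn parent x) (h.pbd x hx) hiter'
          rw [rootOf_pf h hx] at hK
          refine ⟨K + 1, ?_⟩
          rw [Function.iterate_succ_apply, hpf', if_neg hxrp, hK]
    intro x hx
    obtain ⟨K, hK⟩ := hreach n x hx rfl
    have htroot : pfn (parent.set rp ((rq : ℕ) : Int))
        (if rootOfN n parent x = rp then rq else rootOfN n parent x)
        = (if rootOfN n parent x = rp then rq else rootOfN n parent x) := by
      by_cases hc : rootOfN n parent x = rp
      · rw [if_pos hc, hpf', if_neg hrqrp, hrootq]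
      · rw [if_neg hc, hpf', if_neg hc]
        exact rootOf_isRoot h hx
    exact (root_unique h' hx K _ hK htroot).symm
  · ext y
    simp only [rootsF, Finset.mem_filter, Finset.mem_erase, Finset.mem_range, hpf']
    by_cases hy : y = rp
    · subst hy
      simp [hrqrp, hrootp]
    · simp [hy]


-- pure case analysis for the relabeling step
theorem relabel_iff (r1 r2 Rp Rq rp rq : ℕ) (a b Lp Lq : Int)
    (hr : r1 ≠ r2) (hab : a ≠ b)
    (hpq : Rp = Rq ↔ Lp = Lq)
    (h1p : Rp = r1 ↔ Lp = a) (h2p : Rp = r2 ↔ Lp = b)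
    (h1q : Rq = r1 ↔ Lq = a) (h2q : Rq = r2 ↔ Lq = b)
    (hset : (rp = r1 ∧ rq = r2) ∨ (rp = r2 ∧ rq = r1)) :
    ((if Rp = rp then rq else Rp) = (if Rq = rp then rq else Rq)) ↔
      ((if Lp = a then b else Lp) = (if Lq = a then b else Lq)) := by
  rcases hset with ⟨rfl, rfl⟩ | ⟨rfl, rfl⟩ <;>
    by_cases hLpa : Lp = a <;> by_cases hLpb : Lp = b <;>
    by_cases hLqa : Lq = a <;> by_cases hLqb : Lq = b <;>
    simp_all <;> simp_all [eq_comm]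

-- one loop iteration preserves the simulation
theorem step_ok (n : ℕ) (st : Int × List Int × List Int) (lab : List Int) (c1 c2 : Int)
    (h : SimInv n st lab) (h1 : PySem.Raise.InRange n c1) (h2 : PySem.Raise.InRange n c2) :
    SimInv n (ufUnion st.1 st.2.1 st.2.2 c1 c2)
      (let a := PySem.List.pyGetD lab c1 0
       let b := PySem.List.pyGetD lab c2 0
       if a ≠ b then lab.map (fun x => if x = a then b else x) else lab) := by
  obtain ⟨cnt, parent, size⟩ := st
  obtain ⟨hInv, hlablen, hcnt, hrel⟩ := h
  simp only at hInv hcnt hrel ⊢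
  set j1 := wrapIdx n c1 with hj1def
  set j2 := wrapIdx n c2 with hj2def
  have hj1 : j1 < n := wrapIdx_lt n c1 h1
  have hj2 : j2 < n := wrapIdx_lt n c2 h2
  obtain ⟨parent1, heq1, hInv1, hiff1, hroots1⟩ := find_ok' hInv h1
  obtain ⟨parent2, heq2, hInv2, hiff2, hroots2⟩ := find_ok' hInv1 h2
  set r1 := rootOfN n parent j1 with hr1def
  set r2 := rootOfN n parent j2 with hr2def
  have hr2' : rootOfN n parent1 j2 = r2 := hroots1 j2 hj2
  have hr1lt : r1 < n := rootOf_lt hInv hj1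
  have hr2lt : r2 < n := rootOf_lt hInv hj2
  have hiff12 : ∀ x, pfn parent2 x = x ↔ pfn parent x = x :=
    fun x => (hiff2 x).trans (hiff1 x)
  have hroots12 : ∀ x < n, rootOfN n parent2 x = rootOfN n parent x :=
    fun x hx => (hroots2 x hx).trans (hroots1 x hx)
  have hrootsF2 : rootsF n parent2 = rootsF n parent := by
    ext y
    simp only [rootsF, Finset.mem_filter, Finset.mem_range]
    exact and_congr_right (fun _ => ⟨fun hh => (hiff12 y).1 hh, fun hh => (hiff12 y).2 hh⟩)
  have ha : PySem.List.pyGetD lab c1 0 = lab.getD j1 0 := pyGetD_wrap lab c1 n hlablen h1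
  have hb : PySem.List.pyGetD lab c2 0 = lab.getD j2 0 := pyGetD_wrap lab c2 n hlablen h2
  have hr12iff : (r1 = r2) ↔ lab.getD j1 0 = lab.getD j2 0 := hrel j1 hj1 j2 hj2
  have hufeq : ufUnion cnt parent size c1 c2 =
      (if ((r1 : ℕ) : Int) = ((r2 : ℕ) : Int) then (cnt, parent2, size)
       else
        let sp := PySem.List.pyGetD size ((r1 : ℕ) : Int) 0
        let sq := PySem.List.pyGetD size ((r2 : ℕ) : Int) 0
        let rp := if sp > sq then ((r2 : ℕ) : Int) else ((r1 : ℕ) : Int)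
        let rq := if sp > sq then ((r1 : ℕ) : Int) else ((r2 : ℕ) : Int)
        (cnt - 1, PySem.List.pySetD parent2 rp rq,
          PySem.List.pySetD size rq
            (PySem.List.pyGetD size rq 0 + PySem.List.pyGetD size rp 0))) := by
    unfold ufUnion
    rw [hInv.plen, heq1]
    simp only
    rw [hInv1.plen, heq2, hr2']
  by_cases hab : lab.getD j1 0 = lab.getD j2 0
  · -- same class: A's union is a no-op (after path compression), B keeps the labels
    have hr12 : r1 = r2 := hr12iff.2 hab
    rw [hufeq, if_pos (by rw [hr12]), ha, hb, if_neg (not_not_intro hab)]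
    refine ⟨hInv2, hlablen, ?_, ?_⟩
    · rw [hrootsF2]; exact hcnt
    · intro p hp q hq
      rw [hroots12 p hp, hroots12 q hq]
      exact hrel p hp q hq
  · -- different classes: A merges two roots, B relabels the first class
    have hr12 : r1 ≠ r2 := fun hc => hab (hr12iff.1 hc)
    have hspval : PySem.List.pyGetD size ((r1 : ℕ) : Int) 0 = size.getD r1 0 :=
      PySem.List.pyGetD_natCast size r1 0
    have hsqval : PySem.List.pyGetD size ((r2 : ℕ) : Int) 0 = size.getD r2 0 :=
      PySem.List.pyGetD_natCast size r2 0
    set rpN := if size.getD r1 0 > size.getD r2 0 then r2 else r1 with hrpdef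
    set rqN := if size.getD r1 0 > size.getD r2 0 then r1 else r2 with hrqdef
    have hrpN : rpN < n := by rw [hrpdef]; split_ifs <;> assumption
    have hrqN : rqN < n := by rw [hrqdef]; split_ifs <;> assumption
    have hrpqne : rpN ≠ rqN := by rw [hrpdef, hrqdef]; split_ifs <;> [exact hr12.symm; exact hr12]
    have hrootp2 : pfn parent2 rpN = rpN := by
      apply (hiff12 rpN).2
      rw [hrpdef]; split_ifs
      · exact rootOf_isRoot hInv hj2
      · exact rootOf_isRoot hInv hj1
    have hrootq2 : pfn parent2 rqN = rqN := by
      apply (hiff12 rqN).2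
      rw [hrqdef]; split_ifs
      · exact rootOf_isRoot hInv hj1
      · exact rootOf_isRoot hInv hj2
    obtain ⟨hInv3, hrootf3, herase3⟩ := merge_ok hInv2 hrpN hrqN hrootp2 hrootq2 hrpqne
    have hcastp : (if size.getD r1 0 > size.getD r2 0
        then ((r2 : ℕ) : Int) else ((r1 : ℕ) : Int)) = ((rpN : ℕ) : Int) := by
      rw [hrpdef]; split_ifs <;> rfl
    have hcastq : (if size.getD r1 0 > size.getD r2 0
        then ((r1 : ℕ) : Int) else ((r2 : ℕ) : Int)) = ((rqN : ℕ) : Int) := by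
      rw [hrqdef]; split_ifs <;> rfl
    rw [hufeq, if_neg (by intro hc; exact hr12 (by exact_mod_cast hc))]
    simp only [PySem.List.pyGetD_natCast]
    rw [hcastp, hcastq]
    simp only [PySem.List.pySetD_natCast, PySem.List.pyGetD_natCast]
    rw [ha, hb, if_pos hab]
    have hmem : rpN ∈ rootsF n parent2 := by
      simp only [rootsF, Finset.mem_filter, Finset.mem_range]
      exact ⟨hrpN, hrootp2⟩
    have hcardpos : 1 ≤ (rootsF n parent2).card := Finset.card_pos.2 ⟨rpN, hmem⟩
    refine ⟨hInv3, by simpa using hlablen, ?_, ?_⟩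
    · rw [herase3, Finset.card_erase_of_mem hmem, hrootsF2] at *
      rw [hrootsF2] at hcardpos
      omega
    · intro p hp q hq
      have hlab' : ∀ x, x < n →
          (lab.map (fun x => if x = lab.getD j1 0 then lab.getD j2 0 else x)).getD x 0
            = if lab.getD x 0 = lab.getD j1 0 then lab.getD j2 0 else lab.getD x 0 := by
        intro x hx
        have hxlen : x < lab.length := by omega
        rw [List.getD_eq_getElem _ 0 (by simpa using hxlen), List.getElem_map,
          List.getD_eq_getElem lab 0 hxlen]
      rw [hrootf3 p hp, hrootf3 q hq, hroots12 p hp, hroots12 q hq, hlab' p hp, hlab' q hq]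
      apply relabel_iff r1 r2 (rootOfN n parent p) (rootOfN n parent q) rpN rqN
        (lab.getD j1 0) (lab.getD j2 0) (lab.getD p 0) (lab.getD q 0) hr12 hab
        (hrel p hp q hq) (hrel p hp j1 hj1) (hrel p hp j2 hj2) (hrel q hq j1 hj1) (hrel q hq j2 hj2)
      rw [hrpdef, hrqdef]
      split_ifs
      · right; exact ⟨rfl, rfl⟩
      · left; exact ⟨rfl, rfl⟩

-- generic: two functions inducing the same fibers have images of equal size
theorem card_image_eq_of_iff {γ : Type} {α β : Type} [DecidableEq γ] [DecidableEq α] [DecidableEq β]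
    (s : Finset γ) (f : γ → α) (g : γ → β)
    (h : ∀ x ∈ s, ∀ y ∈ s, (f x = f y ↔ g x = g y)) :
    (s.image f).card = (s.image g).card := by
  induction s using Finset.induction_on with
  | empty => simp
  | insert a s ha ih =>
    rw [Finset.image_insert, Finset.image_insert]
    have hmem : f a ∈ s.image f ↔ g a ∈ s.image g := by
      constructor
      · intro hm
        obtain ⟨x, hx, hfx⟩ := Finset.mem_image.1 hm
        exact Finset.mem_image.2 ⟨x, hx,
          (h x (Finset.mem_insert_of_mem hx) a (Finset.mem_insert_self a s)).1 hfx⟩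
      · intro hm
        obtain ⟨x, hx, hgx⟩ := Finset.mem_image.1 hm
        exact Finset.mem_image.2 ⟨x, hx,
          (h x (Finset.mem_insert_of_mem hx) a (Finset.mem_insert_self a s)).2 hgx⟩
    have ih' := ih (fun x hx y hy =>
      h x (Finset.mem_insert_of_mem hx) y (Finset.mem_insert_of_mem hy))
    by_cases hf : f a ∈ s.image f
    · rw [Finset.insert_eq_self.2 hf, Finset.insert_eq_self.2 (hmem.1 hf), ih']
    · rw [Finset.card_insert_of_notMem hf,
        Finset.card_insert_of_notMem (fun hc => hf (hmem.2 hc)), ih']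

-- distinct labels = number of roots
theorem count_eq (lab : List Int) (h : UFInv n parent size) (hlen : lab.length = n)
    (hrel : ∀ p < n, ∀ q < n,
      (rootOfN n parent p = rootOfN n parent q ↔ lab.getD p 0 = lab.getD q 0)) :
    PySem.Set.len (PySem.Set.ofList lab) = ((rootsF n parent).card : Int) := by
  have hdedup : PySem.Set.ofList lab = PySem.List.dedup lab := (PySem.List.dedup_eq_ofList lab).symm
  have hnodup : (PySem.Set.ofList lab).Nodup := PySem.Set.nodup_ofList lab
  have hlen1 : (PySem.Set.ofList lab).length = (PySem.Set.ofList lab).toFinset.card :=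
    (List.toFinset_card_of_nodup hnodup).symm
  have htf : (PySem.Set.ofList lab).toFinset = lab.toFinset := by
    ext x
    simp [List.mem_toFinset, PySem.Set.mem_ofList]
  have himg : lab.toFinset = (Finset.range n).image (fun p => lab.getD p 0) := by
    ext x
    simp only [List.mem_toFinset, Finset.mem_image, Finset.mem_range]
    constructor
    · intro hx
      obtain ⟨i, hi, hix⟩ := List.mem_iff_getElem.1 hx
      refine ⟨i, by omega, ?_⟩
      rw [List.getD_eq_getElem lab 0 hi, hix]
    · rintro ⟨i, hi, hix⟩
      rw [← hix, List.getD_eq_getElem lab 0 (by omega)]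
      exact List.getElem_mem _
  have hcard : ((Finset.range n).image (fun p => lab.getD p 0)).card
      = ((Finset.range n).image (fun p => rootOfN n parent p)).card := by
    apply card_image_eq_of_iff
    intro x hx y hy
    exact ((hrel x (Finset.mem_range.1 hx) y (Finset.mem_range.1 hy))).symm
  have hroots : (Finset.range n).image (fun p => rootOfN n parent p) = rootsF n parent := by
    ext r
    simp only [Finset.mem_image, Finset.mem_range, rootsF, Finset.mem_filter]
    constructor
    · rintro ⟨p, hp, rfl⟩
      exact ⟨rootOf_lt h hp, rootOf_isRoot h hp⟩
    · rintro ⟨hr, hfix⟩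
      exact ⟨r, hr, rootOf_fix n parent r hfix⟩
  show ((PySem.Set.ofList lab).length : Int) = _
  rw [hlen1, htf, himg, hcard, hroots]

theorem init_sim (n : ℕ) :
    SimInv n ((n : Int), (List.range n).map (fun i => Int.ofNat i), List.replicate n (1 : Int))
      ((List.range n).map (fun i => Int.ofNat i)) := by
  have hpf : ∀ p, p < n → pfn ((List.range n).map (fun i => Int.ofNat i)) p = p := by
    intro p hp
    unfold pfn
    rw [PySem.List.getD_map_range _ _ _ _ hp]
    rfl
  have hroot : ∀ p, p < n → rootOfN n ((List.range n).map (fun i => Int.ofNat i)) p = p := by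
    intro p hp
    unfold rootOfN
    have : ∀ k, (pfn ((List.range n).map (fun i => Int.ofNat i)))^[k] p = p := by
      intro k
      induction k with
      | zero => rfl
      | succ k ih => rw [Function.iterate_succ_apply', ih, hpf p hp]
    exact this n
  have hsz : ∀ p, p < n → (List.replicate n (1 : Int)).getD p 0 = 1 := by
    intro p hp
    rw [List.getD_eq_getElem _ 0 (by simpa using hp), List.getElem_replicate]
  have hinv : UFInv n ((List.range n).map (fun i => Int.ofNat i)) (List.replicate n (1 : Int)) := by
    refine ⟨by simp, by simp, ?_, ?_, ?_, ?_, ?_, ?_⟩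
    · intro p hp
      rw [PySem.List.getD_map_range _ _ _ _ hp]
      exact Int.natCast_nonneg p
    · intro p hp; rw [hpf p hp]; exact hp
    · intro p hp hne; exact absurd (hpf p hp) hne
    · intro p hp; rw [hsz p hp]
    · intro p hp; rw [hsz p hp]; exact_mod_cast Nat.one_le_iff_ne_zero.2 (by omega)
    · rw [Finset.sum_congr rfl (fun p hp => ?_), Finset.sum_const, Finset.card_range,
        nsmul_eq_mul, mul_one]
      rw [if_pos (hpf p (Finset.mem_range.1 hp)), hsz p (Finset.mem_range.1 hp)]
  refine ⟨hinv, by simp, ?_, ?_⟩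
  · have : rootsF n ((List.range n).map (fun i => Int.ofNat i)) = Finset.range n := by
      ext y
      simp only [rootsF, Finset.mem_filter, Finset.mem_range]
      exact ⟨fun h => h.1, fun h => ⟨h, hpf y h⟩⟩
    rw [this, Finset.card_range]
  · intro p hp q hq
    rw [hroot p hp, hroot q hq]
    rw [PySem.List.getD_map_range _ _ _ _ hp, PySem.List.getD_map_range _ _ _ _ hq]
    exact ⟨fun h => by simp [Int.ofNat_eq_natCast, h], fun h => by simpa [Int.ofNat_eq_natCast] using h⟩

-- the whole loop preserves the simulation
theorem loop_ok (n : ℕ) (row : List Int) :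
    ∀ (L : List ℕ) (st : Int × List Int × List Int) (lab : List Int),
      SimInv n st lab →
      (∀ i ∈ L, PySem.Raise.InRange n
          (PySem.Int.floordiv (PySem.List.pyGetD row ((2 * i : ℕ) : Int) 0) 2) ∧
        PySem.Raise.InRange n
          (PySem.Int.floordiv (PySem.List.pyGetD row ((2 * i + 1 : ℕ) : Int) 0) 2)) →
      SimInv n
        (L.foldl (fun st i =>
          ufUnion st.1 st.2.1 st.2.2
            (PySem.Int.floordiv (PySem.List.pyGetD row ((2 * i : Nat) : Int) 0) 2)
            (PySem.Int.floordiv (PySem.List.pyGetD row ((2 * i + 1 : Nat) : Int) 0) 2)) st)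
        (L.foldl (fun lab i =>
          if PySem.List.pyGetD lab
              (PySem.Int.floordiv (PySem.List.pyGetD row ((2 * i : Nat) : Int) 0) 2) 0 ≠
            PySem.List.pyGetD lab
              (PySem.Int.floordiv (PySem.List.pyGetD row ((2 * i + 1 : Nat) : Int) 0) 2) 0 then
            lab.map (fun x =>
              if x = PySem.List.pyGetD lab
                  (PySem.Int.floordiv (PySem.List.pyGetD row ((2 * i : Nat) : Int) 0) 2) 0 then
                PySem.List.pyGetD lab
                  (PySem.Int.floordiv (PySem.List.pyGetD row ((2 * i + 1 : Nat) : Int) 0) 2) 0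
              else x)
          else lab) lab) := by
  intro L
  induction L with
  | nil => intro st lab h _; exact h
  | cons i L ih =>
    intro st lab h hmem
    simp only [List.foldl_cons]
    exact ih _ _
      (step_ok n st lab _ _ h (hmem i (List.mem_cons_self)).1 (hmem i (List.mem_cons_self)).2)
      (fun x hx => hmem x (List.mem_cons_of_mem _ hx))

-- ===== VERDICT (by name: the statement is the Claim_ definition above) =====
theorem get_couple_swaps_spec : Claim_equal_get_couple_swaps := by
  intro row hdom hpre
  unfold Spec_get_couple_swaps
  simp only [get_couple_swaps, get_couple_swaps_alt]
  set n := row.length / 2 with hndef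
  have hmem : ∀ i ∈ List.range n,
      PySem.Raise.InRange n
        (PySem.Int.floordiv (PySem.List.pyGetD row ((2 * i : ℕ) : Int) 0) 2) ∧
      PySem.Raise.InRange n
        (PySem.Int.floordiv (PySem.List.pyGetD row ((2 * i + 1 : ℕ) : Int) 0) 2) := by
    intro i hi
    have hi' : i < n := List.mem_range.1 hi
    constructor
    · rw [PySem.List.pyGetD_natCast]
      exact hpre (2 * i) (by omega)
    · rw [PySem.List.pyGetD_natCast]
      exact hpre (2 * i + 1) (by omega)
  obtain ⟨hInv, hlen, hcnt, hrel⟩ := loop_ok n row (List.range n) _ _ (init_sim n) hmem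
  rw [hcnt]
  congr 1
  symm
  exact count_eq _ hInv hlen hrel
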